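-- pv_equiv track=rewrite | github.com/zodwick/Wordle_helper--v2 | wordle_bot_v2.py | find_prime_suggestions
-- ===== SOURCE A (Python) =====
-- def find_prime_suggestions(word_list, sorted_letters):
--     word_set = set(word_list)
--     max_num_letters = 0
--     prime_suggestions = []
--     for num_letters in range(len(sorted_letters), 0, -1):
--         for word in word_set:
--             if all(letter in word for letter in sorted_letters[:num_letters]):
--                 if num_letters > max_num_letters:
--                     max_num_letters = num_letters
--                     prime_suggestions = [word]
--                 elif num_letters == max_num_letters:
--                     prime_suggestions.append(word)
--         if len(prime_suggestions) >= 3: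
--             return list(set(prime_suggestions))
--     return list(set(prime_suggestions))
-- ===== SOURCE B (Python) =====
-- def find_prime_suggestions(word_list, sorted_letters):
--     best = 0
--     suggestions = []
--     for word in dict.fromkeys(word_list):
--         m = 0
--         for letter in sorted_letters:
--             if letter in word:
--                 m += 1
--             else:
--                 break
--         if m == 0:
--             continue
--         if m > best:
--             best = m
--             suggestions = [word]
--         elif m == best:
--             suggestions.append(word)
--     return suggestions
-- ===== Notes on version B (the rewrite author's own statement) =====
-- stated objective: faster
-- what changed: Instead of re-scanning every word once per prefix length (outer loop over prefix lengths, inner substring tests over growing prefixes), B makes a single pass over the deduplicated words, computing each word's leading-prefix match length once (stopping at the first missing letter) while tracking the maximum and its collectors.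
import Mathlib
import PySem

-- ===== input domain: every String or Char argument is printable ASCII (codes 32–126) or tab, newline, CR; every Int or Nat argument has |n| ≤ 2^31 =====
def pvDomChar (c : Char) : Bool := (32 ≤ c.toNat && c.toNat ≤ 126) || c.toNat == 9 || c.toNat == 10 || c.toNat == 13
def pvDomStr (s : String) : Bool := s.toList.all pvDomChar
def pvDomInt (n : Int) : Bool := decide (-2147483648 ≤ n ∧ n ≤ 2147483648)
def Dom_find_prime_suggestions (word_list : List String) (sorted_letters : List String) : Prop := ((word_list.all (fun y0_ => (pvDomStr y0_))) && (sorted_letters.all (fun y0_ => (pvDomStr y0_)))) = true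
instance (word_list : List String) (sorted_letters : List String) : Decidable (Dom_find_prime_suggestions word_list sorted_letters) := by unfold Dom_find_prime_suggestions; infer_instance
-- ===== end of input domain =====

-- B replaces A's per-prefix-length rescans of the whole word set by ONE pass over the
-- deduplicated words, computing each word's leading-prefix match length once (stopping at
-- the first missing letter) while tracking the maximum and its collectors (objective: faster).
-- Python returns list(set(...)); outputs are compared as sets, both ports use the
-- first-insertion-order set model PySem.Set.

-- ===== PORT A =====
-- 'all(letter in word for letter in sorted_letters[:num_letters])'; with the Nat index n,
-- sorted_letters[:n] is sorted_letters.take n (PySem.List.slice_to_natCast).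
def pvAllIn (letters : List String) (w : String) : Bool :=
  letters.all (fun l => PySem.Str.isIn l w)

-- the inner 'for word in word_set' loop, state = (max_num_letters, prime_suggestions)
def pvInnerA (sl : List String) (n : Nat) (ws : List String) (st : Nat × List String) :
    Nat × List String :=
  ws.foldl (fun st w =>
    if pvAllIn (sl.take n) w then
      if st.1 < n then (n, [w])
      else if n = st.1 then (st.1, st.2 ++ [w])
      else st
    else st) st

-- the outer 'for num_letters in range(len(sorted_letters), 0, -1)' loop counts num_letters
-- = L, L-1, …, 1 (structural recursion on num_letters), with the early 'return list(set(...))'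
def pvOuterA (sl : List String) (ws : List String) : Nat → Nat × List String → List String
  | 0, st => PySem.Set.ofList st.2
  | n + 1, st =>
    let st' := pvInnerA sl (n + 1) ws st
    if 3 ≤ st'.2.length then PySem.Set.ofList st'.2 else pvOuterA sl ws n st'

def find_prime_suggestions (word_list : List String) (sorted_letters : List String) : List String :=
  pvOuterA sorted_letters (PySem.Set.ofList word_list) sorted_letters.length (0, [])

-- ===== PORT B =====
-- Source B's inner letter loop: count leading letters contained in w, break at the first miss
def pvMatchLen (sl : List String) (w : String) : Nat :=
  match sl with
  | [] => 0
  | l :: rest => if PySem.Str.isIn l w then pvMatchLen rest w + 1 else 0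

-- Source B's loop body: state = (best, suggestions)
def pvStepB (sl : List String) (st : Nat × List String) (w : String) : Nat × List String :=
  let m := pvMatchLen sl w
  if m = 0 then st
  else if st.1 < m then (m, [w])
  else if m = st.1 then (st.1, st.2 ++ [w])
  else st

-- Source B's single pass over dict.fromkeys(word_list)
def find_prime_suggestions_alt (word_list : List String) (sorted_letters : List String) : List String :=
  ((PySem.List.dedup word_list).foldl (pvStepB sorted_letters) (0, [])).2

-- ===== PRECONDITION & SPEC =====
def Spec_find_prime_suggestions (word_list : List String) (sorted_letters : List String) (out : List String) : Prop := out = find_prime_suggestions_alt word_list sorted_letters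
instance (word_list : List String) (sorted_letters : List String) (out : List String) : Decidable (Spec_find_prime_suggestions word_list sorted_letters out) := by unfold Spec_find_prime_suggestions; infer_instance

-- ===== CLAIM (what is proved, stated in full; the proofs are below) =====
def Claim_equal_find_prime_suggestions : Prop := ∀ (word_list : List String) (sorted_letters : List String), Dom_find_prime_suggestions word_list sorted_letters → Spec_find_prime_suggestions word_list sorted_letters (find_prime_suggestions word_list sorted_letters)

-- ===== LEMMAS AND PROOFS =====

-- running maximum of the match lengths, as B's fold tracks it
def pvMb (sl : List String) (ws : List String) (b : Nat) : Nat :=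
  ws.foldl (fun a w => max a (pvMatchLen sl w)) b

theorem pvMatchLen_le (sl : List String) (w : String) : pvMatchLen sl w ≤ sl.length := by
  induction sl with
  | nil => simp [pvMatchLen]
  | cons l rest ih =>
    simp only [pvMatchLen, List.length_cons]
    split <;> omega

theorem pvAllIn_take (sl : List String) (w : String) (n : Nat) (hn : n ≤ sl.length) :
    pvAllIn (sl.take n) w = decide (n ≤ pvMatchLen sl w) := by
  induction sl generalizing n with
  | nil => simp at hn; simp [hn, pvAllIn, pvMatchLen]
  | cons l rest ih =>
    cases n with
    | zero => simp [pvAllIn]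
    | succ k =>
      have hk := ih k (by simpa using hn)
      simp only [List.take_succ_cons, pvAllIn, List.all_cons, pvMatchLen,
        PySem.Str.isIn_eq] at hk ⊢
      by_cases h : PySem.Chars.isIn l.toList w.toList = true
      · simp [h, hk]
      · simp [h]

theorem pvMb_cons (sl : List String) (x : String) (ws : List String) (b : Nat) :
    pvMb sl (x :: ws) b = pvMb sl ws (max b (pvMatchLen sl x)) := rfl

theorem pvMb_le (sl : List String) (ws : List String) (b : Nat) : b ≤ pvMb sl ws b := by
  induction ws generalizing b with
  | nil => simp [pvMb]
  | cons w rest ih =>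
    rw [pvMb_cons]
    have := ih (max b (pvMatchLen sl w))
    omega

theorem pvMatchLen_le_pvMb (sl : List String) (ws : List String) (b : Nat) (w : String)
    (hw : w ∈ ws) : pvMatchLen sl w ≤ pvMb sl ws b := by
  induction ws generalizing b with
  | nil => simp at hw
  | cons x rest ih =>
    rcases List.mem_cons.mp hw with h | h
    · subst h
      rw [pvMb_cons]
      have := pvMb_le sl rest (max b (pvMatchLen sl w))
      omega
    · rw [pvMb_cons]
      exact ih _ h

theorem pvMb_attained (sl : List String) (ws : List String) (b : Nat)
    (h : b < pvMb sl ws b) : ∃ w ∈ ws, pvMatchLen sl w = pvMb sl ws b := by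
  induction ws generalizing b with
  | nil => simp [pvMb] at h
  | cons x rest ih =>
    rw [pvMb_cons] at h ⊢
    by_cases hx : max b (pvMatchLen sl x) < pvMb sl rest (max b (pvMatchLen sl x))
    · obtain ⟨w, hw, hww⟩ := ih _ hx
      exact ⟨w, List.mem_cons_of_mem _ hw, hww⟩
    · have hle := pvMb_le sl rest (max b (pvMatchLen sl x))
      have heq : pvMb sl rest (max b (pvMatchLen sl x)) = max b (pvMatchLen sl x) := by omega
      refine ⟨x, List.mem_cons_self, ?_⟩
      rw [heq] at h ⊢
      omega

theorem pvMb_le_length (sl : List String) (ws : List String) :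
    pvMb sl ws 0 ≤ sl.length := by
  induction ws with
  | nil => simp [pvMb]
  | cons x rest ih =>
    by_cases h : 0 < pvMb sl (x :: rest) 0
    · obtain ⟨w, _, hw⟩ := pvMb_attained sl (x :: rest) 0 h
      rw [← hw]; exact pvMatchLen_le sl w
    · omega

-- Set.ofList of a duplicate-free list is the list itself
theorem pvOfList_nodup {α : Type} [BEq α] [LawfulBEq α] (l : List α) (h : l.Nodup) :
    PySem.Set.ofList l = l := by
  have gen : ∀ (l : List α) (s : PySem.Set α), (s ++ l).Nodup →
      l.foldl PySem.Set.add s = s ++ l := by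
    intro l
    induction l with
    | nil => intro s _; simp
    | cons x rest ih =>
      intro s hs
      have hx : x ∉ s := by
        intro hmem
        have := List.disjoint_of_nodup_append (by simpa using hs)
        exact this hmem (by simp)
      simp only [List.foldl_cons, PySem.Set.add_of_not_mem hx]
      have := ih (s ++ [x]) (by simpa using hs)
      simpa using this
  have := gen l [] (by simpa using h)
  simpa [PySem.Set.ofList_eq_foldl] using this

-- ---- inner-loop characterisation ----
theorem pvInnerA_lt (sl : List String) (n : Nat) (ws : List String) (b : Nat)
    (ps : List String) (h : n < b) : pvInnerA sl n ws (b, ps) = (b, ps) := by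
  induction ws with
  | nil => rfl
  | cons w rest ih =>
    simp only [pvInnerA, List.foldl_cons]
    split
    · have h1 : ¬ b < n := by omega
      have h2 : ¬ n = b := by omega
      simp only [h1, h2, if_false]
      exact ih
    · exact ih

theorem pvInnerA_eq (sl : List String) (n : Nat) (ws : List String) (ps : List String) :
    pvInnerA sl n ws (n, ps) = (n, ps ++ ws.filter (fun w => pvAllIn (sl.take n) w)) := by
  induction ws generalizing ps with
  | nil => simp [pvInnerA]
  | cons w rest ih =>
    simp only [pvInnerA, List.foldl_cons, List.filter_cons]
    by_cases h : pvAllIn (sl.take n) w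
    · simp only [h, if_true, lt_irrefl, if_false, if_pos rfl]
      simpa [pvInnerA] using ih (ps ++ [w])
    · simp only [h, if_false, Bool.false_eq_true]
      simpa [pvInnerA] using ih ps

theorem pvInnerA_gt (sl : List String) (n : Nat) (ws : List String) (b : Nat)
    (ps : List String) (h : b < n) :
    pvInnerA sl n ws (b, ps) =
      if ws.filter (fun w => pvAllIn (sl.take n) w) = [] then (b, ps)
      else (n, ws.filter (fun w => pvAllIn (sl.take n) w)) := by
  induction ws with
  | nil => simp [pvInnerA]
  | cons w rest ih =>
    simp only [pvInnerA, List.foldl_cons, List.filter_cons]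
    by_cases hw : pvAllIn (sl.take n) w
    · simp only [hw, if_true, if_pos h]
      have := pvInnerA_eq sl n rest [w]
      simp only [pvInnerA] at this
      rw [this]
      simp
    · simp only [hw, Bool.false_eq_true, if_false]
      exact ih

-- ---- outer-loop characterisation ----
theorem pvOuterA_low (sl : List String) (ws : List String) (n b : Nat) (ps : List String)
    (h : n < b) : pvOuterA sl ws n (b, ps) = PySem.Set.ofList ps := by
  induction n with
  | zero => rfl
  | succ k ih =>
    simp only [pvOuterA, pvInnerA_lt sl (k + 1) ws b ps h]
    split
    · rfl
    · exact ih (by omega)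

theorem pvOuterA_high (sl : List String) (ws : List String) (n : Nat)
    (hn : n ≤ sl.length) (hK : pvMb sl ws 0 ≤ n) :
    pvOuterA sl ws n (0, []) = pvOuterA sl ws (pvMb sl ws 0) (0, []) := by
  induction n with
  | zero =>
    have h0 : pvMb sl ws 0 = 0 := by omega
    rw [h0]
  | succ k ih =>
    by_cases hEq : pvMb sl ws 0 = k + 1
    · rw [hEq]
    · have hlt : pvMb sl ws 0 ≤ k := by omega
      have hfil : ws.filter (fun w => pvAllIn (sl.take (k + 1)) w) = [] := by
        apply List.filter_eq_nil_iff.mpr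
        intro w hw
        rw [pvAllIn_take sl w (k + 1) hn]
        have := pvMatchLen_le_pvMb sl ws 0 w hw
        simp; omega
      simp only [pvOuterA, pvInnerA_gt sl (k + 1) ws 0 [] (by omega), hfil, if_pos rfl]
      rw [if_neg (by simp)]
      exact ih (by omega) hlt

theorem pvOuterA_at_max (sl : List String) (ws : List String)
    (hK : 0 < pvMb sl ws 0) (hlen : pvMb sl ws 0 ≤ sl.length) :
    pvOuterA sl ws (pvMb sl ws 0) (0, []) =
      PySem.Set.ofList (ws.filter (fun w => decide (pvMatchLen sl w = pvMb sl ws 0))) := by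
  obtain ⟨K', hK'⟩ : ∃ K', pvMb sl ws 0 = K' + 1 := ⟨pvMb sl ws 0 - 1, by omega⟩
  have hlen' : K' + 1 ≤ sl.length := hK' ▸ hlen
  have hfil : ws.filter (fun w => pvAllIn (sl.take (K' + 1)) w) =
      ws.filter (fun w => decide (pvMatchLen sl w = K' + 1)) := by
    apply List.filter_congr
    intro w hw
    rw [pvAllIn_take sl w (K' + 1) hlen']
    have := pvMatchLen_le_pvMb sl ws 0 w hw
    rw [hK'] at this
    simp; omega
  have hne : ws.filter (fun w => pvAllIn (sl.take (K' + 1)) w) ≠ [] := by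
    obtain ⟨w, hw, hww⟩ := pvMb_attained sl ws 0 hK
    rw [hK'] at hww
    intro hnil
    have : w ∈ ws.filter (fun w => pvAllIn (sl.take (K' + 1)) w) := by
      apply List.mem_filter.mpr
      exact ⟨hw, by rw [pvAllIn_take sl w (K' + 1) hlen']; simp; omega⟩
    simp [hnil] at this
  rw [hK']
  simp only [pvOuterA, pvInnerA_gt sl (K' + 1) ws 0 [] (by omega), if_neg hne]
  rw [hfil]
  split
  · rfl
  · exact pvOuterA_low sl ws K' (K' + 1) _ (by omega)

-- ---- B's single pass ----
theorem pvFoldB_spec (sl : List String) (ws : List String) (b : Nat) (ps : List String)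
    (hb : b = 0 → ps = []) :
    ws.foldl (pvStepB sl) (b, ps) =
    (pvMb sl ws b,
      (if b = pvMb sl ws b then ps else []) ++
        ws.filter (fun w => decide (pvMatchLen sl w = pvMb sl ws b ∧ 0 < pvMb sl ws b))) := by
  induction ws generalizing b ps with
  | nil => simp [pvMb]
  | cons w rest ih =>
    rw [List.foldl_cons, List.filter_cons, pvMb_cons]
    have hKle := pvMb_le sl rest (max b (pvMatchLen sl w))
    by_cases h0 : pvMatchLen sl w = 0
    · have hst : pvStepB sl (b, ps) w = (b, ps) := by simp [pvStepB, h0]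
      have hmax : max b (pvMatchLen sl w) = b := by omega
      rw [hst, hmax, ih b ps hb]
      have hnot : ¬ (pvMatchLen sl w = pvMb sl rest b ∧ 0 < pvMb sl rest b) := by
        have := pvMb_le sl rest b; omega
      simp [hnot]
    · by_cases h1 : b < pvMatchLen sl w
      · have hst : pvStepB sl (b, ps) w = (pvMatchLen sl w, [w]) := by
          simp [pvStepB, h0, h1]
        have hmax : max b (pvMatchLen sl w) = pvMatchLen sl w := by omega
        rw [hst, hmax, ih (pvMatchLen sl w) [w] (fun h => (h0 h).elim)]
        set Kr := pvMb sl rest (pvMatchLen sl w) with hKr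
        have hK : pvMatchLen sl w ≤ Kr := hKr ▸ pvMb_le sl rest (pvMatchLen sl w)
        have hbne : ¬ b = Kr := by omega
        have hiff : (pvMatchLen sl w = Kr ∧ 0 < Kr) ↔ pvMatchLen sl w = Kr := by
          constructor
          · intro h; exact h.1
          · intro h; exact ⟨h, by omega⟩
        simp only [if_neg hbne, hiff]
        by_cases h2 : pvMatchLen sl w = Kr <;> simp [h2]
      · by_cases h2 : pvMatchLen sl w = b
        · have hst : pvStepB sl (b, ps) w = (b, ps ++ [w]) := by
            simp [pvStepB, h0, h1, h2]
            omega
          have hmax : max b (pvMatchLen sl w) = b := by omega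
          rw [hst, hmax, ih b (ps ++ [w]) (fun hb0 => (h0 (h2.trans hb0)).elim)]
          set Kr := pvMb sl rest b with hKr
          have hK : b ≤ Kr := hKr ▸ pvMb_le sl rest b
          have hiff : (pvMatchLen sl w = Kr ∧ 0 < Kr) ↔ b = Kr := by
            constructor
            · intro h; omega
            · intro h; exact ⟨by omega, by omega⟩
          simp only [hiff]
          by_cases h3 : b = Kr <;> simp [h3]
        · have hst : pvStepB sl (b, ps) w = (b, ps) := by
            simp [pvStepB, h0, h1, h2]
          have hmax : max b (pvMatchLen sl w) = b := by omega
          rw [hst, hmax, ih b ps hb]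
          have hK := pvMb_le sl rest b
          have hnot : ¬ (pvMatchLen sl w = pvMb sl rest b ∧ 0 < pvMb sl rest b) := by omega
          simp [hnot]

-- ===== VERDICT (by name: the statement is the Claim_ definition above) =====
theorem find_prime_suggestions_spec : Claim_equal_find_prime_suggestions := by
  intro word_list sorted_letters _
  unfold Spec_find_prime_suggestions find_prime_suggestions find_prime_suggestions_alt
  rw [PySem.List.dedup_eq_ofList]
  set ws := PySem.Set.ofList word_list with hws
  set sl := sorted_letters with hsl
  have hnd : ws.Nodup := PySem.Set.nodup_ofList word_list
  rw [pvFoldB_spec sl ws 0 [] (fun _ => rfl)]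
  simp only []
  have hlen : pvMb sl ws 0 ≤ sl.length := pvMb_le_length sl ws
  rw [pvOuterA_high sl ws sl.length le_rfl hlen]
  by_cases hK : 0 < pvMb sl ws 0
  · rw [pvOuterA_at_max sl ws hK hlen]
    have hcong : ws.filter (fun w => decide (pvMatchLen sl w = pvMb sl ws 0)) =
        ws.filter (fun w => decide (pvMatchLen sl w = pvMb sl ws 0 ∧ 0 < pvMb sl ws 0)) := by
      apply List.filter_congr
      intro w _
      simp; omega
    rw [pvOfList_nodup _ (hnd.filter _), hcong]
    split <;> simp
  · have hK0 : pvMb sl ws 0 = 0 := by omega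
    rw [hK0]
    simp [pvOuterA, PySem.Set.ofList_eq_foldl]
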